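-- pv_equiv track=rewrite | github.com/alexchronopoulos/adventofcode2020 | day9.py | find_group_sum
-- ===== SOURCE A (Python) =====
-- def find_group_sum(keyNumber: int, batchSize: int, numbers) -> list:
--     sums = []
--     startIndex = 0
--     while startIndex < len(numbers):
--         batchNumbers = numbers[startIndex: (startIndex + batchSize)]
--         sums.append(sum(batchNumbers))
--         if keyNumber in sums:
--             return batchNumbers
--         else:
--             startIndex += 1
-- ===== SOURCE B (Python) =====
-- def find_group_sum(keyNumber: int, batchSize: int, numbers) -> list:
--     # Sliding window: keep a running sum of the current window instead of
--     # re-summing each slice and re-scanning a growing list of sums.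
--     n = len(numbers)
--     windowSum = sum(numbers[:batchSize])
--     for start in range(n):
--         if windowSum == keyNumber:
--             return numbers[start:start + batchSize]
--         windowSum -= numbers[start]
--         if start + batchSize < n:
--             windowSum += numbers[start + batchSize]
--     return None
-- ===== Notes on version B (the rewrite author's own statement) =====
-- stated objective: faster
-- what changed: B maintains one running window sum updated in O(1) per step instead of A's re-summing every slice and re-scanning a growing list of all previous sums; Pre_ excludes negative batchSize, outside the function's natural domain, where A's window slices pick up Python's negative-slice wraparound and neither value is meaningful.
-- outside the precondition, e.g. on find_group_sum(5, -1, [1, 2, 3]): A returns None, B returns []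
import Mathlib
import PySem

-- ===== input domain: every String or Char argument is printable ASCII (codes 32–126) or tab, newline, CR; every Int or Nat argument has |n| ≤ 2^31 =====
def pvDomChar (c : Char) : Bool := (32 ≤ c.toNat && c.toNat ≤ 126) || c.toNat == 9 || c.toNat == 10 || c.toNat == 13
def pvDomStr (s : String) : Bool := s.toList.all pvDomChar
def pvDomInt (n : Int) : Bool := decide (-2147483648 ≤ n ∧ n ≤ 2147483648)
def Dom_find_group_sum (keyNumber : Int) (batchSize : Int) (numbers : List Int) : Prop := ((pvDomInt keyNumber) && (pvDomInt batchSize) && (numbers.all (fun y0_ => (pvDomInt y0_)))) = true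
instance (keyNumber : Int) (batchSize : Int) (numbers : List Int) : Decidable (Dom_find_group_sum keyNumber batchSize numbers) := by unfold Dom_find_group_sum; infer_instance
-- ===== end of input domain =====

-- B replaces A's per-window re-summing and growing-list membership scan by a sliding
-- window with one running sum (objective: faster, measured).

-- ===== PORT A =====
-- A's while loop, state (sums, startIndex)
def findA_loop (keyNumber : Int) (batchSize : Int) (numbers : List Int)
    (sums : List Int) (startIndex : Nat) : Option (List Int) :=
  if h : startIndex < numbers.length then
    let batchNumbers := PySem.List.slice numbers (some (startIndex : Int)) (some ((startIndex : Int) + batchSize))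
    let sums' := sums ++ [batchNumbers.sum]
    if sums'.contains keyNumber then some batchNumbers
    else findA_loop keyNumber batchSize numbers sums' (startIndex + 1)
  else none
termination_by numbers.length - startIndex
decreasing_by omega

def find_group_sum (keyNumber : Int) (batchSize : Int) (numbers : List Int) : Option (List Int) :=
  findA_loop keyNumber batchSize numbers [] 0

-- ===== PORT B =====
-- Source B's 'for start in range(n)' loop carrying the running windowSum
def findB_loop (keyNumber : Int) (batchSize : Int) (numbers : List Int)
    (n : Nat) (start : Nat) (windowSum : Int) : Option (List Int) :=
  if h : start < n then
    if windowSum = keyNumber then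
      some (PySem.List.slice numbers (some (start : Int)) (some ((start : Int) + batchSize)))
    else
      let w1 := windowSum - PySem.List.pyGetD numbers (start : Int) 0
      let w2 := if (start : Int) + batchSize < (n : Int)
                then w1 + PySem.List.pyGetD numbers ((start : Int) + batchSize) 0
                else w1
      findB_loop keyNumber batchSize numbers n (start + 1) w2
  else none
termination_by n - start
decreasing_by omega

def find_group_sum_alt (keyNumber : Int) (batchSize : Int) (numbers : List Int) : Option (List Int) :=
  findB_loop keyNumber batchSize numbers numbers.length 0
    (PySem.List.slice numbers none (some batchSize)).sum

-- ===== PRECONDITION & SPEC =====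
-- Pre_ excludes negative batchSize (a negative window width, outside the natural domain):
-- there A's slices numbers[i:i+batchSize] pick up Python's negative-slice wraparound and
-- neither program's value is meaningful.
def Pre_find_group_sum (keyNumber : Int) (batchSize : Int) (numbers : List Int) : Prop :=
  0 ≤ batchSize
instance (keyNumber : Int) (batchSize : Int) (numbers : List Int) : Decidable (Pre_find_group_sum keyNumber batchSize numbers) := by unfold Pre_find_group_sum; infer_instance

def pvWitness_find_group_sum : Int × Int × List Int := (5, 2, [1, 2, 3, 4])

def Spec_find_group_sum (keyNumber : Int) (batchSize : Int) (numbers : List Int) (out : Option (List Int)) : Prop := out = find_group_sum_alt keyNumber batchSize numbers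
instance (keyNumber : Int) (batchSize : Int) (numbers : List Int) (out : Option (List Int)) : Decidable (Spec_find_group_sum keyNumber batchSize numbers out) := by unfold Spec_find_group_sum; infer_instance

-- ===== CLAIM (what is proved, stated in full; the proofs are below) =====
def Claim_equal_find_group_sum : Prop := ∀ (keyNumber : Int) (batchSize : Int) (numbers : List Int), Dom_find_group_sum keyNumber batchSize numbers → Pre_find_group_sum keyNumber batchSize numbers → Spec_find_group_sum keyNumber batchSize numbers (find_group_sum keyNumber batchSize numbers)

-- ===== LEMMAS AND PROOFS =====

-- the clamped window end min (i+b) n, as a Nat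
def winEnd (n : Nat) (b : Int) (i : Nat) : Nat := (min ((i : Int) + b) (n : Int)).toNat

-- the running window sum B maintains
def winSum (numbers : List Int) (b : Int) (i : Nat) : Int :=
  ((numbers.drop i).take (winEnd numbers.length b i - i)).sum

lemma clampIdx_eq_winEnd (numbers : List Int) (b : Int) (hb : 0 ≤ b) (i : Nat) :
    PySem.List.clampIdx numbers.length ((i : Int) + b) = winEnd numbers.length b i := by
  simp only [PySem.List.clampIdx, winEnd]
  split_ifs <;> omega

lemma sum_window (numbers : List Int) (i j : Nat) (hij : i ≤ j) :
    ((numbers.drop i).take (j - i)).sum = (numbers.take j).sum - (numbers.take i).sum := by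
  have h : numbers.take j = numbers.take i ++ (numbers.drop i).take (j - i) := by
    conv_lhs => rw [show j = i + (j - i) by omega]
    exact List.take_add
  rw [h, List.sum_append]; ring

lemma take_succ_sum (numbers : List Int) (m : Nat) (hm : m < numbers.length) :
    (numbers.take (m + 1)).sum = (numbers.take m).sum + numbers[m] := by
  rw [List.take_add_one, List.sum_append, List.getElem?_eq_getElem hm]
  simp

-- the sliding-window update of Source B preserves the window-sum invariant
lemma winSum_step (numbers : List Int) (b : Int) (hb : 0 ≤ b) (i : Nat)
    (hi : i < numbers.length) :
    (if (i : Int) + b < (numbers.length : Int)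
       then winSum numbers b i - numbers[i] + PySem.List.pyGetD numbers ((i : Int) + b) 0
       else winSum numbers b i - numbers[i])
    = winSum numbers b (i + 1) := by
  set n := numbers.length with hn
  have hwe : winEnd n b i ≤ n := by simp only [winEnd]; omega
  have hwi : i ≤ winEnd n b i := by simp only [winEnd]; omega
  by_cases hlt : (i : Int) + b < (n : Int)
  · rw [if_pos hlt]
    have he : winEnd n b i = ((i : Int) + b).toNat := by simp only [winEnd]; omega
    have he' : winEnd n b (i + 1) = ((i : Int) + b).toNat + 1 := by
      simp only [winEnd]; omega
    have hbn : ((i : Int) + b).toNat < n := by omega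
    have hidx : (i : Int) + b = (((i : Int) + b).toNat : Int) := by omega
    rw [hidx, PySem.List.pyGetD_natCast]
    rw [List.getD_eq_getElem?_getD, List.getElem?_eq_getElem hbn]
    simp only [Option.getD_some]
    simp only [winSum]
    rw [sum_window numbers i _ (by omega), sum_window numbers (i+1) _ (by simp only [winEnd]; omega)]
    rw [he, he', take_succ_sum numbers _ (by omega), take_succ_sum numbers i hi]
    ring
  · rw [if_neg hlt]
    have he : winEnd n b i = n := by simp only [winEnd]; omega
    have he' : winEnd n b (i + 1) = n := by simp only [winEnd]; omega
    simp only [winSum]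
    rw [sum_window numbers i _ (by omega), sum_window numbers (i+1) _ (by simp only [winEnd]; omega)]
    rw [he, he', take_succ_sum numbers i hi]
    ring

lemma loops_eq (keyNumber batchSize : Int) (hb : 0 ≤ batchSize) (numbers : List Int) :
    ∀ (d i : Nat) (sums : List Int),
      numbers.length - i ≤ d →
      sums.contains keyNumber = false →
      findA_loop keyNumber batchSize numbers sums i
        = findB_loop keyNumber batchSize numbers numbers.length i
            (winSum numbers batchSize i) := by
  intro d
  induction d with
  | zero =>
    intro i sums hd _
    rw [findA_loop, findB_loop, dif_neg (by omega), dif_neg (by omega)]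
  | succ d ih =>
    intro i sums hd hmem
    rw [findA_loop, findB_loop]
    by_cases hi : i < numbers.length
    · rw [dif_pos hi, dif_pos hi]
      -- A's batch is the current window, its sum is the running sum
      have hslice : PySem.List.slice numbers (some (i : Int)) (some ((i : Int) + batchSize))
          = (numbers.drop i).take (winEnd numbers.length batchSize i - i) := by
        simp only [PySem.List.slice]
        rw [clampIdx_eq_winEnd numbers batchSize hb i]
        have hstart : PySem.List.clampIdx numbers.length (i : Int) = i := by
          simp only [PySem.List.clampIdx]; split_ifs <;> omega
        rw [hstart]
      have hcond : ((sums ++ [((numbers.drop i).take (winEnd numbers.length batchSize i - i)).sum]).contains keyNumber = true)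
          ↔ winSum numbers batchSize i = keyNumber := by
        simp only [List.contains_append, hmem, Bool.false_or, List.contains_cons,
          List.contains_nil, Bool.or_false, beq_iff_eq, winSum]
        exact eq_comm
      by_cases he : winSum numbers batchSize i = keyNumber
      · rw [hslice, if_pos (hcond.mpr he), if_pos he]

      · rw [hslice, if_neg (fun hh => he (hcond.mp hh)), if_neg he]
        have hg : PySem.List.pyGetD numbers (i : Int) 0 = numbers[i] := by
          rw [PySem.List.pyGetD_natCast]
          rw [List.getD_eq_getElem?_getD, List.getElem?_eq_getElem hi]
          simp only [Option.getD_some]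
        have := winSum_step numbers batchSize hb i hi
        rw [ih (i + 1) _ (by omega)
          (Bool.eq_false_iff.mpr (fun hh => he (hcond.mp hh)))]
        congr 1
        rw [← this, hg]
    · rw [dif_neg hi, dif_neg hi]

lemma init_winSum (numbers : List Int) (batchSize : Int) (hb : 0 ≤ batchSize) :
    (PySem.List.slice numbers none (some batchSize)).sum = winSum numbers batchSize 0 := by
  rw [PySem.List.slice_to numbers hb]
  simp only [winSum, winEnd, List.drop_zero, Nat.sub_zero]
  rw [show ((0 : Nat) : Int) + batchSize = batchSize from by simp]
  by_cases h : batchSize ≤ (numbers.length : Int)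
  · rw [min_eq_left h]
  · rw [min_eq_right (by omega), List.take_of_length_le (by omega), List.take_of_length_le (by omega)]

-- ===== VERDICT (by name: the statement is the Claim_ definition above) =====
theorem find_group_sum_spec : Claim_equal_find_group_sum := by
  intro keyNumber batchSize numbers _ hb
  unfold Spec_find_group_sum find_group_sum find_group_sum_alt
  rw [init_winSum numbers batchSize hb]
  exact loops_eq keyNumber batchSize hb numbers numbers.length 0 [] (by omega) rfl
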